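-- pv_equiv track=rewrite | github.com/tranquilo-01/Algorithms-and-Data-Structures-AGH-Course | ASD_dynamiczne_nauka/ladowanie_promu.py | laduj_rek
-- ===== SOURCE A (Python) =====
-- def laduj_rek(cars, i, left1, left2):
--     res1 = res2 = 0
--     if i > len(cars) - 1 or cars[i] > left1 and cars[i] > left2:
--         return 0
--
--     if cars[i] <= left1:
--         res1 = laduj_rek(cars, i + 1, left1 - cars[i], left2)
--
--     if cars[i] <= left2:
--         res2 = laduj_rek(cars, i + 1, left1, left2 - cars[i])
--
--     return max(res1, res2) + 1
-- ===== SOURCE B (Python) =====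
-- def laduj_rek(cars, i, left1, left2):
--     # Level-by-level search: keep the set of reachable (left1, left2) states and
--     # count how many cars can be placed before every branch gets stuck.
--     n = len(cars)
--     states = {(left1, left2)}
--     count = 0
--     for j in range(i, n):
--         c = cars[j]
--         nxt = set()
--         for l1, l2 in states:
--             if c <= l1:
--                 nxt.add((l1 - c, l2))
--             if c <= l2:
--                 nxt.add((l1, l2 - c))
--         if not nxt:
--             break
--         states = nxt
--         count += 1
--     return count
-- ===== Notes on version B (the rewrite author's own statement) =====
-- stated objective: alternative
-- what changed: Replaces the branching recursion (one call tree node per lane-assignment path) with an iterative level-by-level search that maintains the deduplicated set of reachable (left1,left2) states and counts levels until the set dies out.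
import Mathlib
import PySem

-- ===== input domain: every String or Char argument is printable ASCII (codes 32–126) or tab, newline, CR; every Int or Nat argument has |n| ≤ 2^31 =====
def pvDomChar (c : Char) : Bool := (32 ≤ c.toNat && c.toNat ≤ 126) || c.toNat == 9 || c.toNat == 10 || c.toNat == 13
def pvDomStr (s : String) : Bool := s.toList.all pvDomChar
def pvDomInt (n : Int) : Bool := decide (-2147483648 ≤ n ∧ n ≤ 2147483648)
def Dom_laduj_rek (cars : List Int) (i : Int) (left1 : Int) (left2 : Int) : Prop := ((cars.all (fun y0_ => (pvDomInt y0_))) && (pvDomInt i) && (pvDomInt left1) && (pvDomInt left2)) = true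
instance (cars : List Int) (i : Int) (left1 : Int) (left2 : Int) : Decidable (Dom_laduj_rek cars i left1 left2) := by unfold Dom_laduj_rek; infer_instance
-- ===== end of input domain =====

-- B replaces A's branching recursion by an iterative level-by-level search over the
-- deduplicated set of reachable (left1,left2) states; equal return values are proved on Pre_.


-- ===== PORT A =====
-- Literal port of A: the 'none' branch of pyGet? is Python's IndexError (excluded by Pre_).
def laduj_rek (cars : List Int) (i : Int) (left1 : Int) (left2 : Int) : Int :=
  if i > (cars.length : Int) - 1 then 0
  else
    match PySem.List.pyGet? cars i with
    | none => 0  -- Python raises IndexError here; outside Pre_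
    | some c =>
      if c > left1 ∧ c > left2 then 0
      else
        let res1 := if c ≤ left1 then laduj_rek cars (i + 1) (left1 - c) left2 else 0
        let res2 := if c ≤ left2 then laduj_rek cars (i + 1) left1 (left2 - c) else 0
        max res1 res2 + 1
termination_by ((cars.length : Int) - i).toNat
decreasing_by all_goals omega

-- ===== PORT B =====
-- inner 'for l1, l2 in states' loop of Source B: builds the next level as a Python set
def bStep (c : Int) (states : List (Int × Int)) : List (Int × Int) :=
  states.foldl (fun acc p =>
    let acc := if c ≤ p.1 then PySem.Set.add acc (p.1 - c, p.2) else acc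
    if c ≤ p.2 then PySem.Set.add acc (p.1, p.2 - c) else acc) []

-- outer 'for j in range(i, n)' loop of Source B with its break
def bLoop (cars : List Int) (n : Int) (states : List (Int × Int)) (count : Int) (j : Int) : Int :=
  if j ≥ n then count
  else
    match PySem.List.pyGet? cars j with
    | none => count  -- Python raises IndexError here; outside Pre_
    | some c =>
      let nxt := bStep c states
      if nxt = [] then count
      else bLoop cars n nxt (count + 1) (j + 1)
termination_by (n - j).toNat
decreasing_by all_goals omega

def laduj_rek_alt (cars : List Int) (i : Int) (left1 : Int) (left2 : Int) : Int :=
  bLoop cars (cars.length : Int) [(left1, left2)] 0 i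

-- ===== PRECONDITION & SPEC =====
-- Pre_ excludes exactly the inputs where Python A raises IndexError (i < -len(cars) while
-- i <= len(cars)-1 makes cars[i] out of range); Python B raises there too.
def Pre_laduj_rek (cars : List Int) (i : Int) (left1 : Int) (left2 : Int) : Prop :=
  -(cars.length : Int) ≤ i ∨ i > (cars.length : Int) - 1
instance (cars : List Int) (i : Int) (left1 : Int) (left2 : Int) : Decidable (Pre_laduj_rek cars i left1 left2) := by unfold Pre_laduj_rek; infer_instance

def pvWitness_laduj_rek : List Int × Int × Int × Int := ([3, 4, 2], 0, 5, 4)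

def Spec_laduj_rek (cars : List Int) (i : Int) (left1 : Int) (left2 : Int) (out : Int) : Prop := out = laduj_rek_alt cars i left1 left2
instance (cars : List Int) (i : Int) (left1 : Int) (left2 : Int) (out : Int) : Decidable (Spec_laduj_rek cars i left1 left2 out) := by unfold Spec_laduj_rek; infer_instance

-- ===== CLAIM (what is proved, stated in full; the proofs are below) =====
def Claim_equal_laduj_rek : Prop := ∀ (cars : List Int) (i : Int) (left1 : Int) (left2 : Int), Dom_laduj_rek cars i left1 left2 → Pre_laduj_rek cars i left1 left2 → Spec_laduj_rek cars i left1 left2 (laduj_rek cars i left1 left2)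

-- ===== LEMMAS AND PROOFS =====

-- maximum of a list of Ints, floored at 0 (all values we take it of are ≥ 0)
def lmax (l : List Int) : Int := l.foldl max 0

lemma le_foldl_max {l : List Int} (a : Int) : a ≤ l.foldl max a := by
  induction l generalizing a with
  | nil => exact le_refl a
  | cons x xs ih => exact le_trans (le_max_left a x) (ih _)

lemma mem_le_foldl_max {l : List Int} {x : Int} (h : x ∈ l) (a : Int) : x ≤ l.foldl max a := by
  induction l generalizing a with
  | nil => cases h
  | cons y ys ih =>
    rcases List.mem_cons.mp h with h | h
    · subst h; exact le_trans (le_max_right a x) (le_foldl_max _)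
    · exact ih h _

lemma foldl_max_le {l : List Int} {a b : Int} (ha : a ≤ b) (h : ∀ x ∈ l, x ≤ b) :
    l.foldl max a ≤ b := by
  induction l generalizing a with
  | nil => exact ha
  | cons x xs ih =>
    exact ih (by have := h x (List.mem_cons_self) ; omega)
      (fun y hy => h y (List.mem_cons_of_mem _ hy))

lemma foldl_max_mem {l : List Int} (a : Int) : l.foldl max a = a ∨ l.foldl max a ∈ l := by
  induction l generalizing a with
  | nil => exact Or.inl rfl
  | cons x xs ih =>
    rcases ih (max a x) with h | h
    · rcases max_choice a x with hc | hc
      · exact Or.inl (by rw [List.foldl_cons, h, hc])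
      · exact Or.inr (by rw [List.foldl_cons, h, hc]; exact List.mem_cons_self)
    · exact Or.inr (List.mem_cons_of_mem _ h)

lemma lmax_nonneg (l : List Int) : 0 ≤ lmax l := le_foldl_max 0
lemma le_lmax {l : List Int} {x : Int} (h : x ∈ l) : x ≤ lmax l := mem_le_foldl_max h 0
lemma lmax_le {l : List Int} {b : Int} (hb : 0 ≤ b) (h : ∀ x ∈ l, x ≤ b) : lmax l ≤ b :=
  foldl_max_le hb h
lemma lmax_mem (l : List Int) : lmax l = 0 ∨ lmax l ∈ l := foldl_max_mem 0

lemma lmax_eq_zero {l : List Int} (h : ∀ x ∈ l, x = 0) : lmax l = 0 :=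
  le_antisymm (lmax_le (le_refl 0) (fun x hx => le_of_eq (h x hx))) (lmax_nonneg l)

-- one inner-loop body step of bStep, as a membership statement
lemma step_mem (c : Int) (acc : List (Int × Int)) (p q : Int × Int) :
    q ∈ (if c ≤ p.2
          then PySem.Set.add (if c ≤ p.1 then PySem.Set.add acc (p.1 - c, p.2) else acc) (p.1, p.2 - c)
          else (if c ≤ p.1 then PySem.Set.add acc (p.1 - c, p.2) else acc)) ↔
      q ∈ acc ∨ ((c ≤ p.1 ∧ q = (p.1 - c, p.2)) ∨ (c ≤ p.2 ∧ q = (p.1, p.2 - c))) := by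
  split_ifs with h1 h2 h2 <;> (try simp only [PySem.Set.mem_add]) <;> tauto

lemma mem_bStep_aux (c : Int) (S acc : List (Int × Int)) (q : Int × Int) :
    q ∈ S.foldl (fun acc p =>
      let acc := if c ≤ p.1 then PySem.Set.add acc (p.1 - c, p.2) else acc
      if c ≤ p.2 then PySem.Set.add acc (p.1, p.2 - c) else acc) acc ↔
    q ∈ acc ∨ ∃ p ∈ S, (c ≤ p.1 ∧ q = (p.1 - c, p.2)) ∨ (c ≤ p.2 ∧ q = (p.1, p.2 - c)) := by
  induction S generalizing acc with
  | nil => simp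
  | cons p ps ih =>
    rw [List.foldl_cons, ih]
    dsimp only
    rw [step_mem]
    simp only [List.exists_mem_cons_iff]
    exact or_assoc

lemma mem_bStep (c : Int) (S : List (Int × Int)) (q : Int × Int) :
    q ∈ bStep c S ↔
    ∃ p ∈ S, (c ≤ p.1 ∧ q = (p.1 - c, p.2)) ∨ (c ≤ p.2 ∧ q = (p.1, p.2 - c)) := by
  rw [bStep, mem_bStep_aux]; simp

lemma laduj_rek_nonneg (cars : List Int) (i left1 left2 : Int) :
    0 ≤ laduj_rek cars i left1 left2 := by
  rw [laduj_rek]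
  split
  · exact le_refl 0
  split
  · exact le_refl 0
  next c heq =>
    split
    · exact le_refl 0
    next hne =>
      show (0:Int) ≤ max (if c ≤ left1 then laduj_rek cars (i + 1) (left1 - c) left2 else 0)
          (if c ≤ left2 then laduj_rek cars (i + 1) left1 (left2 - c) else 0) + 1
      have h2 : (0:Int) ≤ if c ≤ left2 then laduj_rek cars (i + 1) left1 (left2 - c) else 0 := by
        by_cases h : c ≤ left2
        · rw [if_pos h]; exact laduj_rek_nonneg cars (i + 1) left1 (left2 - c)
        · rw [if_neg h]
      omega
termination_by ((cars.length : Int) - i).toNat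
decreasing_by all_goals omega

-- unfolding of A one step when the current car exists
lemma laduj_rek_step {cars : List Int} {j c : Int} (hj : ¬ j > (cars.length : Int) - 1)
    (hc : PySem.List.pyGet? cars j = some c) (l1 l2 : Int) :
    laduj_rek cars j l1 l2 =
      if c ≤ l1 ∨ c ≤ l2 then
        max (if c ≤ l1 then laduj_rek cars (j + 1) (l1 - c) l2 else 0)
            (if c ≤ l2 then laduj_rek cars (j + 1) l1 (l2 - c) else 0) + 1
      else 0 := by
  rw [laduj_rek]
  simp only [hj, if_false, hc]
  by_cases h : c ≤ l1 ∨ c ≤ l2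
  · have hns : ¬ (c > l1 ∧ c > l2) := by omega
    simp [hns, h]
  · have hs : c > l1 ∧ c > l2 := by omega
    simp [hs, h]

-- the main invariant: bLoop from level S at index j returns count + max of A over S
lemma bLoop_eq (cars : List Int) (j : Int) (S : List (Int × Int)) (cnt : Int) :
    bLoop cars (cars.length : Int) S cnt j =
      cnt + lmax (S.map (fun p => laduj_rek cars j p.1 p.2)) := by
  rw [bLoop]
  by_cases hj : j ≥ (cars.length : Int)
  · simp only [hj, if_true]
    have hz : lmax (S.map (fun p => laduj_rek cars j p.1 p.2)) = 0 := by
      apply lmax_eq_zero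
      intro x hx
      rcases List.mem_map.mp hx with ⟨p, _, hp⟩
      rw [← hp, laduj_rek]
      have hgt : j > (cars.length : Int) - 1 := by omega
      simp [hgt]
    omega
  · simp only [hj, if_false]
    rcases hcg : PySem.List.pyGet? cars j with _ | c <;> dsimp only
    · -- IndexError branch in both ports
      have hz : lmax (S.map (fun p => laduj_rek cars j p.1 p.2)) = 0 := by
        apply lmax_eq_zero
        intro x hx
        rcases List.mem_map.mp hx with ⟨p, _, hp⟩
        rw [← hp, laduj_rek]
        have hj2 : ¬ j > (cars.length : Int) - 1 := by omega
        simp [hj2, hcg]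
      omega
    · have hj2 : ¬ j > (cars.length : Int) - 1 := by omega
      by_cases hnx : bStep c S = []
      · rw [if_pos hnx]
        have hz : lmax (S.map (fun p => laduj_rek cars j p.1 p.2)) = 0 := by
          apply lmax_eq_zero
          intro x hx
          rcases List.mem_map.mp hx with ⟨p, hpS, hp⟩
          have hstuck : ¬ (c ≤ p.1 ∨ c ≤ p.2) := by
            rintro (h | h)
            · have hm : (p.1 - c, p.2) ∈ bStep c S :=
                (mem_bStep c S _).mpr ⟨p, hpS, Or.inl ⟨h, rfl⟩⟩
              rw [hnx] at hm; cases hm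
            · have hm : (p.1, p.2 - c) ∈ bStep c S :=
                (mem_bStep c S _).mpr ⟨p, hpS, Or.inr ⟨h, rfl⟩⟩
              rw [hnx] at hm; cases hm
          rw [← hp, laduj_rek_step hj2 hcg, if_neg hstuck]
        omega
      · rw [if_neg hnx]
        have hrec := bLoop_eq cars (j + 1) (bStep c S) (cnt + 1)
        rw [hrec]
        set K := lmax ((bStep c S).map (fun p => laduj_rek cars (j + 1) p.1 p.2)) with hK
        set M := lmax (S.map (fun p => laduj_rek cars j p.1 p.2)) with hM
        have hKnn : 0 ≤ K := lmax_nonneg _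
        have hMle : M ≤ 1 + K := by
          apply lmax_le (by omega)
          intro x hx
          rcases List.mem_map.mp hx with ⟨p, hpS, hp⟩
          rw [← hp, laduj_rek_step hj2 hcg]
          by_cases hfit : c ≤ p.1 ∨ c ≤ p.2
          · rw [if_pos hfit]
            have h1 : (if c ≤ p.1 then laduj_rek cars (j + 1) (p.1 - c) p.2 else 0) ≤ K := by
              by_cases h : c ≤ p.1
              · rw [if_pos h]
                exact le_lmax (List.mem_map.mpr ⟨(p.1 - c, p.2),
                  (mem_bStep c S _).mpr ⟨p, hpS, Or.inl ⟨h, rfl⟩⟩, rfl⟩)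
              · rw [if_neg h]; exact hKnn
            have h2 : (if c ≤ p.2 then laduj_rek cars (j + 1) p.1 (p.2 - c) else 0) ≤ K := by
              by_cases h : c ≤ p.2
              · rw [if_pos h]
                exact le_lmax (List.mem_map.mpr ⟨(p.1, p.2 - c),
                  (mem_bStep c S _).mpr ⟨p, hpS, Or.inr ⟨h, rfl⟩⟩, rfl⟩)
              · rw [if_neg h]; exact hKnn
            omega
          · rw [if_neg hfit]; omega
        have hMge : 1 + K ≤ M := by
          rcases lmax_mem ((bStep c S).map (fun p => laduj_rek cars (j + 1) p.1 p.2)) with hz | hm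
          · -- K = 0: any surviving state shows M ≥ 1
            rw [← hK] at hz
            rcases List.exists_mem_of_ne_nil _ hnx with ⟨q, hq⟩
            rcases (mem_bStep c S q).mp hq with ⟨p, hpS, hcase⟩
            have hfit : c ≤ p.1 ∨ c ≤ p.2 := by
              rcases hcase with ⟨h, _⟩ | ⟨h, _⟩
              · exact Or.inl h
              · exact Or.inr h
            have hA : 1 ≤ laduj_rek cars j p.1 p.2 := by
              rw [laduj_rek_step hj2 hcg, if_pos hfit]
              have h2 : (0:Int) ≤ if c ≤ p.2 then laduj_rek cars (j + 1) p.1 (p.2 - c) else 0 := by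
                by_cases h : c ≤ p.2
                · rw [if_pos h]; exact laduj_rek_nonneg cars _ _ _
                · rw [if_neg h]
              omega
            have hle := le_lmax (l := S.map (fun p => laduj_rek cars j p.1 p.2)) (List.mem_map.mpr ⟨p, hpS, rfl⟩)
            rw [← hM] at hle
            omega
          · rcases List.mem_map.mp hm with ⟨q, hq, hqv⟩
            rw [← hK] at hqv
            rcases (mem_bStep c S q).mp hq with ⟨p, hpS, hcase⟩
            have hA : 1 + K ≤ laduj_rek cars j p.1 p.2 := by
              rw [laduj_rek_step hj2 hcg]
              rcases hcase with ⟨h, hqe⟩ | ⟨h, hqe⟩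
              · rw [if_pos (Or.inl h)]
                have hKle : K ≤ (if c ≤ p.1 then laduj_rek cars (j + 1) (p.1 - c) p.2 else 0) := by
                  rw [if_pos h, ← hqv, hqe]
                have hmx := le_trans hKle
                  (le_max_left (if c ≤ p.1 then laduj_rek cars (j + 1) (p.1 - c) p.2 else 0)
                    (if c ≤ p.2 then laduj_rek cars (j + 1) p.1 (p.2 - c) else 0))
                omega
              · rw [if_pos (Or.inr h)]
                have hKle : K ≤ (if c ≤ p.2 then laduj_rek cars (j + 1) p.1 (p.2 - c) else 0) := by
                  rw [if_pos h, ← hqv, hqe]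
                have hmx := le_trans hKle
                  (le_max_right (if c ≤ p.1 then laduj_rek cars (j + 1) (p.1 - c) p.2 else 0)
                    (if c ≤ p.2 then laduj_rek cars (j + 1) p.1 (p.2 - c) else 0))
                omega
            have hle := le_lmax (l := S.map (fun p => laduj_rek cars j p.1 p.2)) (List.mem_map.mpr ⟨p, hpS, rfl⟩)
            rw [← hM] at hle
            omega
        omega
termination_by ((cars.length : Int) - j).toNat
decreasing_by all_goals omega

lemma lmax_singleton (x : Int) : lmax [x] = max 0 x := rfl

-- ===== VERDICT (by name: the statement is the Claim_ definition above) =====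
theorem laduj_rek_spec : Claim_equal_laduj_rek := by
  intro cars i left1 left2 _ _
  unfold Spec_laduj_rek laduj_rek_alt
  rw [bLoop_eq]
  have h := laduj_rek_nonneg cars i left1 left2
  simp only [List.map_cons, List.map_nil]
  rw [lmax_singleton]
  omega
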